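-- pv_equiv track=rewrite | github.com/odormond/adventofcode | 2020/6/six.py | to_list_of_everyone_answers
-- ===== SOURCE A (Python) =====
-- def to_list_of_everyone_answers(text):
--     answers = []
--     for group in map(str.split, text.strip().split("\n\n")):
--         common = set(group.pop())
--         while group:
--             common.intersection_update(group.pop())
--         answers.append(common)
--     return answers
-- ===== SOURCE B (Python) =====
-- def to_list_of_everyone_answers(text):
--     answers = []
--     for group in text.strip().split("\n\n"):
--         persons = group.split()
--         seed = persons[-1]  # same IndexError as A's pop() on a wordless group
--         answers.append({c for c in seed if all(c in p for p in persons)})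
--     return answers
-- ===== Notes on version B (the rewrite author's own statement) =====
-- stated objective: idiomatic
-- what changed: Instead of mutating the word list with pop() and accumulating pairwise set intersections, B keeps each candidate letter of one seed person via a single membership test across all persons (a set comprehension with all()).
import Mathlib
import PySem

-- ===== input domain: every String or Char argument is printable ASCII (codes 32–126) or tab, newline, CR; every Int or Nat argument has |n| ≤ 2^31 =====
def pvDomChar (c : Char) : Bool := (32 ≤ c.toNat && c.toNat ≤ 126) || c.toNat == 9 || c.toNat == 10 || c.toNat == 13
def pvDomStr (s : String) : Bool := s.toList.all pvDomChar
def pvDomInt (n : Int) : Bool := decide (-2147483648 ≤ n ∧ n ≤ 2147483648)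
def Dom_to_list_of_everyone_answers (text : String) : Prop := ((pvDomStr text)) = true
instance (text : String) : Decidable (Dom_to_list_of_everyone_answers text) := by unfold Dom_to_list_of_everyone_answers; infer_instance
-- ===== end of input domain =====

-- B replaces A's pop()-driven pairwise set-intersection loop by a comprehension keeping each
-- letter of a seed person that every person contains (objective: idiomatic; same cost).
-- Python's sets of 1-char strings are modelled as sets of Chars mapped to 1-char Strings at append
-- time (exact: 'c in p' for a 1-char string c is Char membership, and c ↦ String.ofList [c] is injective).

-- ===== PORT A =====
-- the groups: text.strip().split("\n\n"); sep is the nonempty literal "\n\n", so split? is some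
def pvGroups (text : String) : List String :=
  (PySem.Str.split? (PySem.Str.strip text) "\n\n").getD []

-- while group: common.intersection_update(group.pop())  — pop() takes from the end, so the
-- successive popped words are exactly the reversed rest list, folded in order
def pvAGroup (g : String) : List String :=
  match (PySem.Str.split₀ g).reverse with
  | [] => []  -- group.pop() raises IndexError here; excluded by Pre_
  | last :: rest =>
      (rest.foldl (fun common w => PySem.Set.inter common w.toList)
        (PySem.Set.ofList last.toList)).map (fun c => String.ofList [c])

def to_list_of_everyone_answers (text : String) : List (List String) :=
  (pvGroups text).foldl (fun answers g => answers ++ [pvAGroup g]) []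

-- ===== PORT B =====
def pvBGroup (g : String) : List String :=
  let persons := PySem.Str.split₀ g
  let seed := PySem.List.pyGetD persons (-1) ""  -- persons[-1]; IndexError excluded by Pre_
  ((PySem.List.dedup seed.toList).filter
    (fun c => persons.all (fun p => p.toList.contains c))).map (fun c => String.ofList [c])

def to_list_of_everyone_answers_alt (text : String) : List (List String) :=
  (pvGroups text).map pvBGroup

-- ===== PRECONDITION & SPEC =====
-- Pre_ excludes exactly the inputs where some group has no words: there A's pop() (and B's
-- persons[-1]) raises IndexError.
def Pre_to_list_of_everyone_answers (text : String) : Prop :=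
  ∀ g ∈ pvGroups text, PySem.Str.split₀ g ≠ []
instance (text : String) : Decidable (Pre_to_list_of_everyone_answers text) := by
  unfold Pre_to_list_of_everyone_answers; infer_instance

def pvWitness_to_list_of_everyone_answers : String := "ab\nb\n\ncd"

def Spec_to_list_of_everyone_answers (text : String) (out : List (List String)) : Prop := out = to_list_of_everyone_answers_alt text
instance (text : String) (out : List (List String)) : Decidable (Spec_to_list_of_everyone_answers text out) := by unfold Spec_to_list_of_everyone_answers; infer_instance

-- ===== CLAIM (what is proved, stated in full; the proofs are below) =====
def Claim_equal_to_list_of_everyone_answers : Prop := ∀ (text : String), Dom_to_list_of_everyone_answers text → Pre_to_list_of_everyone_answers text → Spec_to_list_of_everyone_answers text (to_list_of_everyone_answers text)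

-- ===== LEMMAS AND PROOFS =====


-- A's while loop of pairwise intersections is a filter by membership in every remaining word
lemma pv_foldl_inter (rest : List String) (s : List Char) :
    rest.foldl (fun common w => PySem.Set.inter common w.toList) s
      = s.filter (fun c => rest.all (fun w => w.toList.contains c)) := by
  induction rest generalizing s with
  | nil => simp
  | cons w rest ih =>
      rw [List.foldl_cons, ih]
      simp only [PySem.Set.inter, PySem.Set.contains, List.filter_filter, List.all_cons]
      exact List.filter_congr (fun c _ => by simp [Bool.and_comm])

lemma pv_group_eq (g : String) (h : PySem.Str.split₀ g ≠ []) : pvAGroup g = pvBGroup g := by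
  unfold pvAGroup pvBGroup
  rcases hrev : (PySem.Str.split₀ g).reverse with _ | ⟨last, rest⟩
  · exact absurd (by simpa using congrArg List.reverse hrev) h
  · have hws : PySem.Str.split₀ g = rest.reverse ++ [last] := by
      simpa using congrArg List.reverse hrev
    rw [hws]
    dsimp only
    rw [PySem.List.pyGetD_neg_one_append_singleton, pv_foldl_inter,
        ← PySem.List.dedup_eq_ofList]
    congr 1
    refine List.filter_congr (fun c hc => ?_)
    have hcl : c ∈ last.toList := (PySem.List.mem_dedup _ _).1 hc
    simp [List.all_append, List.all_reverse, hcl]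

-- ===== VERDICT =====
set_option maxHeartbeats 1000000 in
theorem to_list_of_everyone_answers_spec : Claim_equal_to_list_of_everyone_answers := by
  intro text _ hpre
  unfold Spec_to_list_of_everyone_answers to_list_of_everyone_answers to_list_of_everyone_answers_alt
  rw [PySem.List.foldl_append_singleton_eq_map]
  exact List.map_congr_left (fun g hg => pv_group_eq g (hpre g hg))
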